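-- pv_equiv track=rewrite | github.com/koleini/AnimalRecognitionDemo | app/init.py | integer_to_semver
-- ===== SOURCE A (Python) =====
-- def integer_to_semver(v):
--     ver = ""
--     for _ in range(3):
--         if ver != "":
--             ver = "." + ver
--         ver = str(v % 100) + ver
--         v = v // 100
--
--     return "v" + ver
-- ===== SOURCE B (Python) =====
-- def integer_to_semver(v):
--     # closed form: each base-100 digit extracted directly, one format expression
--     return "v%d.%d.%d" % (v // 100 // 100 % 100, v // 100 % 100, v % 100)
-- ===== Notes on version B (the rewrite author's own statement) =====
-- stated objective: simpler
-- what changed: Replaces the three-iteration string-building loop (with its dot-insertion conditional and accumulator) by one closed-form format expression that extracts each base-100 digit directly.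
import Mathlib
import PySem

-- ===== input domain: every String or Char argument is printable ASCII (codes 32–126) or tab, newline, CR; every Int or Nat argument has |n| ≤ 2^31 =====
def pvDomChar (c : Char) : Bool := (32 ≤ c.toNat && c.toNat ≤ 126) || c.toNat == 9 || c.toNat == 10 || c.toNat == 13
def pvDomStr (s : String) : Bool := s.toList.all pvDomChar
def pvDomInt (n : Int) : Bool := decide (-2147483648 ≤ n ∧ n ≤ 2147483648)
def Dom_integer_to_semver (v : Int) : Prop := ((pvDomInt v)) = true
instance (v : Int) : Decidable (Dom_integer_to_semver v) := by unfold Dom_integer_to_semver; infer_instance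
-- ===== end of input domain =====

-- B replaces A's three-iteration accumulator loop by one closed-form format expression (simpler).

-- ===== PORT A =====
-- loop state: (ver, v); one fold step per iteration of `the Python for-loop`
def integer_to_semver (v : Int) : String :=
  let st := (PySem.List.pyRange 0 3 1).foldl
    (fun (s : String × Int) _ =>
      let ver := if s.1 ≠ "" then "." ++ s.1 else s.1
      (PySem.Int.toStr (PySem.Int.mod s.2 100) ++ ver, PySem.Int.floordiv s.2 100))
    ("", v)
  "v" ++ st.1

-- ===== PORT B =====
def integer_to_semver_alt (v : Int) : String :=
  "v" ++ PySem.Int.toStr (PySem.Int.mod (PySem.Int.floordiv (PySem.Int.floordiv v 100) 100) 100)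
      ++ "." ++ PySem.Int.toStr (PySem.Int.mod (PySem.Int.floordiv v 100) 100)
      ++ "." ++ PySem.Int.toStr (PySem.Int.mod v 100)

-- ===== PRECONDITION & SPEC =====
def Spec_integer_to_semver (v : Int) (out : String) : Prop := out = integer_to_semver_alt v
instance (v : Int) (out : String) : Decidable (Spec_integer_to_semver v out) := by unfold Spec_integer_to_semver; infer_instance

-- ===== CLAIM (what is proved, stated in full; the proofs are below) =====
def Claim_equal_integer_to_semver : Prop := ∀ (v : Int), Dom_integer_to_semver v → Spec_integer_to_semver v (integer_to_semver v)

-- ===== LEMMAS AND PROOFS =====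
theorem toDigitsCore_ne_nil (f : Nat) : ∀ (n : Nat) (acc : List Char), acc ≠ [] →
    Nat.toDigitsCore 10 f n acc ≠ [] := by
  induction f with
  | zero => intro n acc h; rw [Nat.toDigitsCore]; exact h
  | succ f ih =>
    intro n acc h; rw [Nat.toDigitsCore]; split
    · simp
    · exact ih _ _ (by simp)

theorem toDigitsCore_succ_ne_nil (f n : Nat) (acc : List Char) :
    Nat.toDigitsCore 10 (f+1) n acc ≠ [] := by
  rw [Nat.toDigitsCore]; split
  · simp
  · exact toDigitsCore_ne_nil _ _ _ (by simp)

theorem toStr_ne_empty (n : Int) : PySem.Int.toStr n ≠ "" := by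
  unfold PySem.Int.toStr PySem.Int.toChars
  split <;> simp [String.ext_iff, Nat.toDigits, toDigitsCore_succ_ne_nil]

theorem append_toStr_ne_empty (n : Int) (s : String) : PySem.Int.toStr n ++ s ≠ "" := by
  intro h
  exact toStr_ne_empty n (String.append_eq_empty_iff.mp h).1

-- ===== VERDICT (by name: the statement is the Claim_ definition above) =====
theorem integer_to_semver_spec : Claim_equal_integer_to_semver := by
  intro v _
  unfold Spec_integer_to_semver integer_to_semver integer_to_semver_alt
  have h3 : PySem.List.pyRange 0 3 1 = [0, 1, 2] := by decide
  rw [h3]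
  simp only [List.foldl]
  rw [if_neg (by simp : ¬ ("" : String) ≠ "")]
  rw [String.append_empty]
  rw [if_pos (toStr_ne_empty _), if_pos (append_toStr_ne_empty _ _)]
  simp [String.append_assoc]
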